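-- pv_equiv track=rewrite | github.com/landrix/Gettext-for-Delphi | dxgettext/htmltranslator/htmltranslator.py | text2po
-- ===== SOURCE A (Python) =====
-- def text2po(msg):
-- 	res=""
-- 	for ch in msg:
-- 		if ch=="\"":
-- 			res=res+"\\\""
-- 		elif ch=="\n":
-- 			res=res+"\\n"
-- 		elif ch!="\r":
-- 			res=res+ch
-- 	return res
-- ===== SOURCE B (Python) =====
-- def text2po(msg):
-- 	return msg.replace("\"", "\\\"").replace("\n", "\\n").replace("\r", "")
-- ===== Notes on version B (the rewrite author's own statement) =====
-- stated objective: faster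
-- what changed: Replaced the character-by-character accumulator loop with three whole-string str.replace passes (escape quotes, escape newlines, strip carriage returns); no inserted string contains a later-pass target, so the passes compose to the same result.
import Mathlib
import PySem

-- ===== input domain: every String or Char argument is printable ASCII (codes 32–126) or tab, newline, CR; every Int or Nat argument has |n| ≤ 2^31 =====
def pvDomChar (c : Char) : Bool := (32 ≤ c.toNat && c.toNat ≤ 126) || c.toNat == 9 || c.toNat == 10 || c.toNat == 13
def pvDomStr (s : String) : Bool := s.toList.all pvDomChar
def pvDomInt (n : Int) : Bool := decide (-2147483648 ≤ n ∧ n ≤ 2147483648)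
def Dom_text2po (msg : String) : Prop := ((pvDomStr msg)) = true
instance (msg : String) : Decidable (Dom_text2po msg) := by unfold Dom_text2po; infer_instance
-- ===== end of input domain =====

-- B replaces A's character-by-character accumulator loop with three chained str.replace passes (idiomatic); same result.


-- ===== PORT A =====
-- the loop body: res + escaped(ch) in the three branches, dropping '\r'
def text2poStep (res : List Char) (ch : Char) : List Char :=
  if ch = '"' then res ++ ['\\', '"']
  else if ch = '\n' then res ++ ['\\', 'n']
  else if ch ≠ '\r' then res ++ [ch]
  else res

def text2po (msg : String) : String :=
  String.ofList (msg.toList.foldl text2poStep [])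

-- ===== PORT B =====
def text2po_alt (msg : String) : String :=
  PySem.Str.replace (PySem.Str.replace (PySem.Str.replace msg "\"" "\\\"") "\n" "\\n") "\r" ""

-- ===== PRECONDITION & SPEC =====
def Spec_text2po (msg : String) (out : String) : Prop := out = text2po_alt msg
instance (msg : String) (out : String) : Decidable (Spec_text2po msg out) := by unfold Spec_text2po; infer_instance

-- ===== CLAIM (what is proved, stated in full; the proofs are below) =====
def Claim_equal_text2po : Prop := ∀ (msg : String), Dom_text2po msg → Spec_text2po msg (text2po msg)

-- ===== LEMMAS AND PROOFS =====

-- single-character replace is a flatMap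
theorem replace_go_single (o : Char) (new : List Char) :
    ∀ (l acc : List Char) (fuel : Nat), l.length ≤ fuel →
      PySem.Chars.replace.go [o] new fuel l acc =
        acc.reverse ++ l.flatMap (fun c => if c = o then new else [c]) := by
  intro l
  induction l with
  | nil =>
    intro acc fuel _
    cases fuel <;> simp [PySem.Chars.replace.go]
  | cons c t ih =>
    intro acc fuel hf
    cases fuel with
    | zero => simp at hf
    | succ fuel =>
      simp only [List.length_cons, Nat.succ_le_succ_iff] at hf
      by_cases hc : c = o
      · subst hc
        have hpre : List.isPrefixOf [c] (c :: t) = true := by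
          simp [List.isPrefixOf]
        simp only [PySem.Chars.replace.go, hpre, if_pos, List.length_cons,
          List.length_nil, List.drop_succ_cons, List.drop_zero]
        rw [ih _ fuel hf]
        simp
      · have hpre : List.isPrefixOf [o] (c :: t) = false := by
          simp [List.isPrefixOf]
          intro h; exact absurd h.symm hc
        simp only [PySem.Chars.replace.go, hpre]
        rw [ih _ fuel hf]
        simp [hc]

theorem replace_single (s : List Char) (o : Char) (new : List Char) :
    PySem.Chars.replace s [o] new = s.flatMap (fun c => if c = o then new else [c]) := by
  unfold PySem.Chars.replace
  rw [if_neg (by simp)]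
  rw [replace_go_single o new s [] s.length le_rfl]
  simp

-- A's loop equals a single flatMap
theorem foldl_step_eq (s acc : List Char) :
    s.foldl text2poStep acc = acc ++ s.flatMap (fun c =>
      if c = '"' then ['\\', '"'] else if c = '\n' then ['\\', 'n']
      else if c ≠ '\r' then [c] else []) := by
  induction s generalizing acc with
  | nil => simp
  | cons c t ih =>
    simp only [List.foldl_cons, List.flatMap_cons, ih]
    unfold text2poStep
    split_ifs <;> simp

-- the three flatMaps fuse into A's single flatMap
theorem flatMap_fuse (s : List Char) :
    ((s.flatMap (fun c => if c = '"' then ['\\', '"'] else [c])).flatMap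
        (fun c => if c = '\n' then ['\\', 'n'] else [c])).flatMap
        (fun c => if c = '\r' then ([] : List Char) else [c]) =
      s.flatMap (fun c =>
        if c = '"' then ['\\', '"'] else if c = '\n' then ['\\', 'n']
        else if c ≠ '\r' then [c] else []) := by
  induction s with
  | nil => simp
  | cons c t ih =>
    simp only [List.flatMap_cons, List.flatMap_append, ih]
    by_cases h1 : c = '"'
    · subst h1; simp
    · by_cases h2 : c = '\n'
      · subst h2; simp
      · by_cases h3 : c = '\r'
        · subst h3; simp
        · simp [h1, h2, h3]

-- ===== VERDICT (by name: the statement is the Claim_ definition above) =====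
theorem text2po_spec : Claim_equal_text2po := by
  intro msg _
  unfold Spec_text2po text2po text2po_alt
  simp only [PySem.Str.replace, String.toList_ofList]
  rw [foldl_step_eq]
  have h : ("\"" : String).toList = ['"'] := rfl
  have h2 : ("\n" : String).toList = ['\n'] := rfl
  have h3 : ("\r" : String).toList = ['\r'] := rfl
  rw [h, h2, h3, replace_single, replace_single, replace_single]
  rw [show ("\\\"" : String).toList = ['\\', '"'] from rfl,
      show ("\\n" : String).toList = ['\\', 'n'] from rfl,
      show ("" : String).toList = [] from rfl]
  rw [flatMap_fuse]
  simp
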